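-- pv_equiv track=rewrite | github.com/carlkma/esc180_coursework | project3/synonyms.py | update_descriptor
-- ===== SOURCE A (Python) =====
-- def update_descriptor(original, sentence, word_interest):
--     for word in sentence:
--         if word != word_interest:
--             if word not in original:
--                 original[word] = 1
--             else:
--                 original[word] += 1
--     return original
-- ===== SOURCE B (Python) =====
-- def update_descriptor(original, sentence, word_interest):
--     # Pass 1: tabulate frequencies of the filtered sentence.
--     counts = {}
--     for w in sentence:
--         if w != word_interest:
--             counts[w] = counts.get(w, 0) + 1
--     # Pass 2: merge the table into original, one update per distinct word.
--     for w, c in counts.items():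
--         original[w] = original.get(w, 0) + c
--     return original
-- ===== Notes on version B (the rewrite author's own statement) =====
-- stated objective: alternative
-- what changed: B replaces A's per-occurrence dict update with a two-pass tabulate-then-merge: it first builds a frequency table of the filtered sentence, then adds each distinct word's total count into original once.
import Mathlib
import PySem

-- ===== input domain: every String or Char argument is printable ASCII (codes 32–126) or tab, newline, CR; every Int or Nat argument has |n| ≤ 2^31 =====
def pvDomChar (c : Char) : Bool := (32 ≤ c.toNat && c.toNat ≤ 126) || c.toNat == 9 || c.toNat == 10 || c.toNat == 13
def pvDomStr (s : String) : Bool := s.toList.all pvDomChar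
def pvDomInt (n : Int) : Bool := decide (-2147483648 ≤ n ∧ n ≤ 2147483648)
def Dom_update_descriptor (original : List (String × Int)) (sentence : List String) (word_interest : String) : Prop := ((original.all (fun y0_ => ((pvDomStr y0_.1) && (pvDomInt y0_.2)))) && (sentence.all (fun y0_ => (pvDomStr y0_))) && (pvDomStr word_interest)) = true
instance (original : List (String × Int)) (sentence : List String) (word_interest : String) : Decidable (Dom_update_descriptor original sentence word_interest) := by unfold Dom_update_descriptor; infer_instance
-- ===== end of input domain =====

-- ===== PORT A =====
-- A: one pass over the sentence, incrementing original[word] per occurrence (skipping word_interest).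
-- B: two passes — tabulate a frequency table of the filtered sentence, then merge it into original
-- per distinct word. Equivalence of the returned value is proved; A mutates its dict in place in Python.
def update_descriptor (original : List (String × Int)) (sentence : List String) (word_interest : String) : List (String × Int) :=
  (sentence.foldl (fun d word =>
      if word ≠ word_interest then
        if ¬ (d.contains word) then d.insert word 1
        else d.insert word (d.getD word 0 + 1)
      else d)
    (PySem.Dict.ofList original)).items

-- ===== PORT B =====
def update_descriptor_alt (original : List (String × Int)) (sentence : List String) (word_interest : String) : List (String × Int) :=
  let counts : PySem.Dict String Int :=
    sentence.foldl (fun c w =>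
        if w ≠ word_interest then c.insert w (c.getD w 0 + 1) else c)
      PySem.Dict.empty
  (counts.items.foldl (fun d p => d.insert p.1 (d.getD p.1 0 + p.2))
    (PySem.Dict.ofList original)).items

-- ===== PRECONDITION & SPEC =====
def Spec_update_descriptor (original : List (String × Int)) (sentence : List String) (word_interest : String) (out : List (String × Int)) : Prop := out = update_descriptor_alt original sentence word_interest
instance (original : List (String × Int)) (sentence : List String) (word_interest : String) (out : List (String × Int)) : Decidable (Spec_update_descriptor original sentence word_interest out) := by unfold Spec_update_descriptor; infer_instance

-- ===== CLAIM (what is proved, stated in full; the proofs are below) =====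
def Claim_equal_update_descriptor : Prop := ∀ (original : List (String × Int)) (sentence : List String) (word_interest : String), Dom_update_descriptor original sentence word_interest → Spec_update_descriptor original sentence word_interest (update_descriptor original sentence word_interest)

-- ===== LEMMAS AND PROOFS =====

-- A fold guarded by `if p w` is the fold over the filtered list.
theorem pv_foldl_guard {α β : Type} (p : β → Prop) [DecidablePred p] (g : α → β → α) :
    ∀ (l : List β) (init : α),
      l.foldl (fun d w => if p w then g d w else d) init
        = (l.filter (fun w => decide (p w))).foldl g init := by
  intro l
  induction l with
  | nil => intro init; rfl
  | cons x xs ih =>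
      intro init
      by_cases h : p x <;> simp [h, ih]

-- value at any key after the merge pass
theorem pv_getD_merge (l : List (String × Int)) (d : PySem.Dict String Int) (k : String) :
    (l.foldl (fun d p => d.insert p.1 (d.getD p.1 0 + p.2)) d).getD k 0
      = d.getD k 0 + ((l.filter (fun p => p.1 = k)).map (·.2)).sum := by
  induction l generalizing d with
  | nil => simp
  | cons q l ih =>
      simp only [List.foldl_cons, ih]
      by_cases h : q.1 = k
      · simp [h]
        ring
      · simp [h, PySem.Dict.getD_insert, Ne.symm h]

theorem pv_main (d0 : PySem.Dict String Int) (hnd : d0.keys.Nodup) (ws : List String) :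
    (ws.foldl (fun d w => d.insert w (d.getD w 0 + 1)) d0).items
      = (((PySem.Dict.counter ws : PySem.Dict String Int).items).foldl
          (fun d p => d.insert p.1 (d.getD p.1 0 + p.2)) d0).items := by
  set G := ws.foldl (fun d w => d.insert w (d.getD w 0 + 1)) d0 with hG
  set H := (((PySem.Dict.counter ws : PySem.Dict String Int).items).foldl
      (fun d p => d.insert p.1 (d.getD p.1 0 + p.2)) d0) with hH
  have hGk : G.keys = PySem.Set.update d0.keys ws := by
    rw [hG]; exact PySem.Dict.keys_foldl_insert ..
  have hHk : H.keys = PySem.Set.update d0.keys ws := by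
    rw [hH]
    have h1 := PySem.Dict.keys_foldl_insert_key
      (l := (PySem.Dict.counter ws : PySem.Dict String Int).items)
      (key := Prod.fst) (f := fun d p => d.getD p.1 0 + p.2) (d := d0)
    rw [h1]
    have h2 : (PySem.Dict.counter ws : PySem.Dict String Int).items.map Prod.fst
        = PySem.Set.ofList ws := by
      have := PySem.Dict.keys_counter (xs := ws)
      simpa [PySem.Dict.keys] using this
    rw [h2, PySem.Set.update_eq_append_filter, PySem.Set.update_eq_append_filter,
      PySem.Set.ofList_ofList]
  have hGnd : G.keys.Nodup := by
    rw [hG]; exact PySem.Dict.nodup_keys_foldl_insert _ _ _ hnd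
  have hHnd : H.keys.Nodup := by
    rw [hH]; exact PySem.Dict.nodup_keys_foldl_insert_key _ _ _ _ hnd
  have hval : ∀ k : String, G.getD k 0 = H.getD k 0 := by
    intro k
    have hGv : G.getD k 0 = d0.getD k 0 + ws.count k := by
      rw [hG]; exact PySem.Dict.getD_foldl_insert_add_one ..
    have hs : (((PySem.Dict.counter ws : PySem.Dict String Int).items.filter
        (fun p => p.1 = k)).map (·.2)).sum = (ws.count k : Int) := by
      rw [PySem.Dict.items_counter]
      rw [List.filter_map, List.map_map]
      have hfil : (PySem.Set.ofList ws).filter ((fun p : String × Int => decide (p.1 = k)) ∘ (fun j => (j, (ws.count j : Int))))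
          = (PySem.Set.ofList ws).filter (fun j => decide (j = k)) := rfl
      rw [hfil]
      by_cases hk : k ∈ ws
      · have hmem : k ∈ PySem.Set.ofList ws := by
          rw [PySem.Set.mem_ofList]; exact hk
        have hcnt : (PySem.Set.ofList ws).count k = 1 :=
          List.count_eq_one_of_mem (PySem.Set.nodup_ofList ws) hmem
        have : (PySem.Set.ofList ws).filter (fun j => decide (j = k)) = [k] := by
          have := List.filter_eq (l := PySem.Set.ofList ws) (a := k)
          simpa [hcnt] using this
        simp [this]
      · have hnm : k ∉ PySem.Set.ofList ws := by
          rw [PySem.Set.mem_ofList]; exact hk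
        have : (PySem.Set.ofList ws).filter (fun j => decide (j = k)) = [] := by
          apply List.filter_eq_nil_iff.mpr
          intro a ha hak
          simp only [decide_eq_true_eq] at hak
          subst hak
          exact hnm ha
        simp [this, List.count_eq_zero_of_not_mem hk]
    rw [hH] at *
    rw [pv_getD_merge, hs, hGv]
  have hGi := PySem.Dict.items_eq_map_keys G hGnd 0
  have hHi := PySem.Dict.items_eq_map_keys H hHnd 0
  rw [hGi, hHi, hGk, hHk]
  exact List.map_congr_left (fun k _ => by rw [hval k])

-- ===== VERDICT (by name: the statement is the Claim_ definition above) =====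
theorem update_descriptor_spec : Claim_equal_update_descriptor := by
  intro original sentence word_interest _
  unfold Spec_update_descriptor update_descriptor update_descriptor_alt
  have hstep : (fun (d : PySem.Dict String Int) (word : String) =>
      if ¬ (d.contains word) then d.insert word 1
      else d.insert word (d.getD word 0 + 1))
      = (fun d word => d.insert word (d.getD word 0 + 1)) := by
    funext d word
    by_cases h : d.contains word = true
    · simp [h]
    · have h' : d.contains word = false := by simpa using h
      rw [PySem.Dict.getD_of_not_contains d 0 h']
      norm_num
  rw [pv_foldl_guard (fun w => w ≠ word_interest), hstep,
      pv_foldl_guard (fun w => w ≠ word_interest)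
        (fun (c : PySem.Dict String Int) w => c.insert w (c.getD w 0 + 1))]
  rw [PySem.Dict.foldl_insert_getD_add_one_eq_counter]
  show (List.foldl (fun (d : PySem.Dict String Int) (word : String) =>
        d.insert word (d.getD word 0 + 1)) (PySem.Dict.ofList original)
        (sentence.filter (fun w => decide (w ≠ word_interest)))).items
      = (List.foldl (fun (d : PySem.Dict String Int) (p : String × Int) =>
          d.insert p.1 (d.getD p.1 0 + p.2)) (PySem.Dict.ofList original)
          (PySem.Dict.counter (sentence.filter (fun w => decide (w ≠ word_interest)))).items).items
  exact pv_main _ (PySem.Dict.nodup_keys_ofList _) _
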